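-- pv_equiv track=rewrite | github.com/olilea/response-time-analysis | data/grapher.py | best_by_col
-- ===== SOURCE A (Python) =====
-- def best_by_col(data, col, low_best=True):
-- 	best = data[0]
-- 	best_val = best[len(best) - 1][col]
-- 	for d in data:
-- 		cur_val = d[len(d) - 1][col]
-- 		if low_best:
-- 			if cur_val < best_val:
-- 				best = d
-- 				best_val = cur_val
-- 		else:
-- 			if cur_val > best_val:
-- 				best = d
-- 				best_val = cur_val
-- 	return best
-- ===== SOURCE B (Python) =====
-- def best_by_col(data, col, low_best=True):
--     key = lambda d: d[len(d) - 1][col]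
--     return sorted(data, key=key, reverse=not low_best)[0]
-- ===== Notes on version B (the rewrite author's own statement) =====
-- stated objective: idiomatic
-- what changed: Replaces the running-best scan with a stable sort on the row's last-column value (reverse for high-best) and returns the first element of the sorted list; stability preserves A's first-on-ties choice.
import Mathlib
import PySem

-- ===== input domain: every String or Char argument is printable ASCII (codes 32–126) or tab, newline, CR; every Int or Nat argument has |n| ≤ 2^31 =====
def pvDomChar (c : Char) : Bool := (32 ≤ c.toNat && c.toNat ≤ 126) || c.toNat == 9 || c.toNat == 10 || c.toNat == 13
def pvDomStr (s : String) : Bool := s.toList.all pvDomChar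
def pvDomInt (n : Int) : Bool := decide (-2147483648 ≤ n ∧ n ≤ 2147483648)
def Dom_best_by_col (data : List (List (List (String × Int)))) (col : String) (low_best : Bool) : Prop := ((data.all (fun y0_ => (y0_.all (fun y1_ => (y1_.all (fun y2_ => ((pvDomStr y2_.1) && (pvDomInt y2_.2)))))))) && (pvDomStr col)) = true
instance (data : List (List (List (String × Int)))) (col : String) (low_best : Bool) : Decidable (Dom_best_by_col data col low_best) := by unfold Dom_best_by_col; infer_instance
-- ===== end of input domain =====

-- ===== PORT A =====
-- B is the same selection done idiomatically: stable sort by the last row's column value, take the first element.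
-- (Equivalence of the sorted-first strategy with A's running-best scan rests on the stability of Python's sort.)

-- d[len(d) - 1][col] as both Pythons compute it (shared helper of both ports)
def keyVal (d : List (List (String × Int))) (col : String) : Int :=
  (((PySem.List.pyGet? d ((d.length : Int) - 1)).getD []).lookup col).getD 0

def best_by_col (data : List (List (List (String × Int)))) (col : String) (low_best : Bool) : List (List (String × Int)) :=
  let best := (PySem.List.pyGet? data 0).getD []
  let best_val := keyVal best col
  (data.foldl (fun st d =>
      let cur_val := keyVal d col
      if low_best then
        if cur_val < st.2 then (d, cur_val) else st
      else
        if cur_val > st.2 then (d, cur_val) else st)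
    (best, best_val)).1

-- ===== PORT B =====
def best_by_col_alt (data : List (List (List (String × Int)))) (col : String) (low_best : Bool) : List (List (String × Int)) :=
  (PySem.List.pyGet? (PySem.List.sorted data (fun d => keyVal d col) (!low_best)) 0).getD []

-- ===== PRECONDITION & SPEC =====
-- Pre_ excludes exactly the inputs on which the Python A raises: empty data (IndexError at data[0]/[0]),
-- an empty row list (IndexError at d[len(d)-1]) or a row whose last dict lacks col (KeyError).
def Pre_best_by_col (data : List (List (List (String × Int)))) (col : String) (low_best : Bool) : Prop :=
  data ≠ [] ∧ ∀ d ∈ data, d ≠ [] ∧ ((d.getLastD []).lookup col).isSome = true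
instance (data : List (List (List (String × Int)))) (col : String) (low_best : Bool) : Decidable (Pre_best_by_col data col low_best) := by unfold Pre_best_by_col; infer_instance

def pvWitness_best_by_col : (List (List (List (String × Int)))) × String × Bool :=
  ([[[("x", 1)]], [[("x", 0)]]], "x", true)

def Spec_best_by_col (data : List (List (List (String × Int)))) (col : String) (low_best : Bool) (out : List (List (String × Int))) : Prop := out = best_by_col_alt data col low_best
instance (data : List (List (List (String × Int)))) (col : String) (low_best : Bool) (out : List (List (String × Int))) : Decidable (Spec_best_by_col data col low_best out) := by unfold Spec_best_by_col; infer_instance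

-- ===== CLAIM (what is proved, stated in full; the proofs are below) =====
def Claim_equal_best_by_col : Prop := ∀ (data : List (List (List (String × Int)))) (col : String) (low_best : Bool), Dom_best_by_col data col low_best → Pre_best_by_col data col low_best → Spec_best_by_col data col low_best (best_by_col data col low_best)

-- ===== LEMMAS AND PROOFS =====

-- Head of the insertion-sort accumulator evolves exactly like a running best:
-- inserting x replaces the head iff `before x head`.
theorem foldl_insertBy_cons {α : Type} (before : α → α → Bool) :
    ∀ (xs : List α) (y : α) (ys : List α),
      ∃ t, xs.foldl (fun acc x => PySem.List.insertBy before x acc) (y :: ys)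
        = (xs.foldl (fun b x => if before x b then x else b) y) :: t := by
  intro xs
  induction xs with
  | nil => intro y ys; exact ⟨ys, rfl⟩
  | cons x xs ih =>
    intro y ys
    by_cases h : before x y = true
    · simpa [PySem.List.insertBy, h] using ih x (y :: ys)
    · simpa [PySem.List.insertBy, h] using ih y (PySem.List.insertBy before x ys)

-- The pair state of A's fold is determined by its first component: st = (b, k b).
theorem foldl_pair_fst {α : Type} (k : α → Int) (cmp : Int → Int → Bool) :
    ∀ (xs : List α) (b : α),
      xs.foldl (fun st d => if cmp (k d) st.2 then (d, k d) else st) (b, k b)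
        = (xs.foldl (fun b d => if cmp (k d) (k b) then d else b) b,
           k (xs.foldl (fun b d => if cmp (k d) (k b) then d else b) b)) := by
  intro xs
  induction xs with
  | nil => intro b; rfl
  | cons x xs ih =>
    intro b
    by_cases h : cmp (k x) (k b) = true
    · simpa [h] using ih x
    · simpa [h] using ih b

-- ===== VERDICT (by name: the statement is the Claim_ definition above) =====
theorem best_by_col_spec : Claim_equal_best_by_col := by
  intro data col low_best _ hpre
  obtain ⟨hne, -⟩ := hpre
  obtain ⟨d, ds, rfl⟩ := List.exists_cons_of_ne_nil hne
  unfold Spec_best_by_col best_by_col best_by_col_alt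
  cases low_best with
  | true =>
    rw [Bool.not_true, PySem.List.sorted_eq_foldl_insertBy]
    have hB := foldl_insertBy_cons (fun a b => decide (keyVal a col < keyVal b col)) ds d []
    obtain ⟨t, ht⟩ := hB
    have hA := foldl_pair_fst (fun x => keyVal x col) (fun a b => decide (a < b)) ds d
    simp only [decide_eq_true_eq] at ht hA
    have hd0 : (PySem.List.pyGet? (d :: ds) 0).getD ([] : List (List (String × Int))) = d := by
      simp [pysem]
    simp only [List.foldl_cons, PySem.List.insertBy, hd0, if_true, lt_irrefl, if_false, ht]
    rw [hA]
    simp [pysem]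
  | false =>
    rw [Bool.not_false, PySem.List.sorted_rev_eq_foldl_insertBy]
    have hB := foldl_insertBy_cons (fun a b => decide (keyVal b col < keyVal a col)) ds d []
    obtain ⟨t, ht⟩ := hB
    have hA := foldl_pair_fst (fun x => keyVal x col) (fun a b => decide (b < a)) ds d
    simp only [decide_eq_true_eq] at ht hA
    have hd0 : (PySem.List.pyGet? (d :: ds) 0).getD ([] : List (List (String × Int))) = d := by
      simp [pysem]
    simp only [List.foldl_cons, PySem.List.insertBy, hd0, if_false, Bool.false_eq_true, gt_iff_lt, lt_irrefl, ht]
    rw [hA]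
    simp [pysem]
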